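-- pv_equiv track=rewrite | github.com/chigyusubs/chigyusubs-pipeline | scripts/transcribe_mimo_video.py | _truncate_repetition
-- ===== SOURCE A (Python) =====
-- def _truncate_repetition(text: str, max_repeats: int = 5) -> str:
--     """Detect and truncate repetition loops in transcription output."""
--     lines = text.splitlines()
--     if len(lines) < max_repeats * 2:
--         return text
--
--     # Sliding window: if the same line appears max_repeats times in a row, truncate
--     result: list[str] = []
--     repeat_count = 0
--     prev_line = None
--     for line in lines:
--         stripped = line.strip()
--         if stripped == prev_line and stripped:
--             repeat_count += 1
--             if repeat_count >= max_repeats: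
--                 continue  # skip further repeats
--         else:
--             repeat_count = 1
--             prev_line = stripped
--         result.append(line)
--
--     return "\n".join(result)
-- ===== SOURCE B (Python) =====
-- def _truncate_repetition(text: str, max_repeats: int = 5) -> str:
--     """Group consecutive lines by their stripped form, then truncate each
--     non-blank run to its first max(1, max_repeats - 1) lines."""
--     lines = text.splitlines()
--     if len(lines) < max_repeats * 2:
--         return text
--     keep = max(1, max_repeats - 1)
--     out = []
--     i, n = 0, len(lines)
--     while i < n:
--         key = lines[i].strip()
--         j = i + 1
--         while j < n and lines[j].strip() == key:
--             j += 1
--         run = lines[i:j]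
--         out.extend(run if not key else run[:keep])
--         i = j
--     return "\n".join(out)
-- ===== Notes on version B (the rewrite author's own statement) =====
-- stated objective: alternative
-- what changed: Replaced A's single pass with a running repeat_count/prev_line counter by a group-then-truncate traversal: find each maximal run of consecutive lines with equal stripped form and keep the whole run if blank, otherwise its first max(1, max_repeats-1) lines.
import Mathlib
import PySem

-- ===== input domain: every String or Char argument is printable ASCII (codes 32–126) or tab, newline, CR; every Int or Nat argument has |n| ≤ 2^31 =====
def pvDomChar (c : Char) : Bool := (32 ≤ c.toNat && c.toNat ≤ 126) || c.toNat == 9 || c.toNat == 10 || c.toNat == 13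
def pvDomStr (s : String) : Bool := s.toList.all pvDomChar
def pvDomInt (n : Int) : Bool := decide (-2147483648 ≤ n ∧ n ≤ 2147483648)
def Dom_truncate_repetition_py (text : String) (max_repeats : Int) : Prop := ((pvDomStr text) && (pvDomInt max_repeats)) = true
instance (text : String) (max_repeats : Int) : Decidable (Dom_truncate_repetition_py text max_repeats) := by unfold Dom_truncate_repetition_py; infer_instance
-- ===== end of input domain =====

-- B replaces A's running repeat_count/prev_line counter with a group-then-truncate
-- traversal (find each run of lines with equal stripped form, keep its first
-- max(1, max_repeats-1) lines unless blank); objective: alternative decomposition.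

-- ===== PORT A =====
-- one iteration of A's for-loop: state = (result, repeat_count, prev_line)
def pvStepA (max_repeats : Int) (st : List String × Int × Option String) (line : String) :
    List String × Int × Option String :=
  let stripped := PySem.Str.strip line
  if some stripped == st.2.2 && stripped != "" then
    let rc := st.2.1 + 1
    if max_repeats ≤ rc then (st.1, rc, st.2.2)       -- repeat_count >= max_repeats: continue
    else (st.1 ++ [line], rc, st.2.2)
  else (st.1 ++ [line], 1, some stripped)

def truncate_repetition_py (text : String) (max_repeats : Int) : String :=
  let lines := PySem.Str.splitlines text
  if (lines.length : Int) < max_repeats * 2 then text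
  else PySem.Str.join "\n" (lines.foldl (pvStepA max_repeats) ([], 0, none)).1

-- ===== PORT B =====
-- Source B's outer while-loop over the remaining lines: peel off the run of lines whose
-- strip equals the head's, keep it whole if blank, else its first `keep` lines.
def pvRunsB (keep : Int) : List String → List String
  | [] => []
  | l :: ls =>
    let key := PySem.Str.strip l
    let grp := ls.takeWhile (fun x => PySem.Str.strip x == key)
    let rest := ls.dropWhile (fun x => PySem.Str.strip x == key)
    (if key == "" then l :: grp else PySem.List.slice (l :: grp) none (some keep)) ++
      pvRunsB keep rest
termination_by ls => ls.length
decreasing_by simpa using Nat.lt_succ_of_le (List.length_dropWhile_le _ _)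

def truncate_repetition_py_alt (text : String) (max_repeats : Int) : String :=
  let lines := PySem.Str.splitlines text
  if (lines.length : Int) < max_repeats * 2 then text
  else PySem.Str.join "\n" (pvRunsB (max 1 (max_repeats - 1)) lines)

-- ===== PRECONDITION & SPEC =====
def Spec_truncate_repetition_py (text : String) (max_repeats : Int) (out : String) : Prop := out = truncate_repetition_py_alt text max_repeats
instance (text : String) (max_repeats : Int) (out : String) : Decidable (Spec_truncate_repetition_py text max_repeats out) := by unfold Spec_truncate_repetition_py; infer_instance

-- ===== CLAIM (what is proved, stated in full; the proofs are below) =====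
def Claim_equal_truncate_repetition_py : Prop := ∀ (text : String) (max_repeats : Int), Dom_truncate_repetition_py text max_repeats → Spec_truncate_repetition_py text max_repeats (truncate_repetition_py text max_repeats)

-- ===== LEMMAS AND PROOFS =====

-- A's loop only ever appends to `result`: the accumulator factors out.
theorem pvStepA_acc (mr : Int) (xs : List String) :
    ∀ (acc : List String) (c : Int) (p : Option String),
      xs.foldl (pvStepA mr) (acc, c, p) =
        (acc ++ (xs.foldl (pvStepA mr) ([], c, p)).1, (xs.foldl (pvStepA mr) ([], c, p)).2) := by
  induction xs with
  | nil => intro acc c p; simp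
  | cons x xs ih =>
    intro acc c p
    simp only [List.foldl_cons]
    by_cases h1 : (some (PySem.Str.strip x) == p && PySem.Str.strip x != "") = true
    · by_cases h2 : mr ≤ c + 1
      · simp only [pvStepA, h1, if_true, if_pos h2]
        exact ih acc (c + 1) p
      · simp only [pvStepA, h1, if_true, if_neg h2]
        rw [ih (acc ++ [x]) (c + 1) p, ih ([] ++ [x]) (c + 1) p]
        simp
    · simp only [pvStepA, h1, if_false, Bool.false_eq_true]
      rw [ih (acc ++ [x]) 1 (some (PySem.Str.strip x)),
          ih ([] ++ [x]) 1 (some (PySem.Str.strip x))]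
      simp

-- a run of lines all stripping to the same nonempty key, entered mid-count c
theorem pvRunA (mr : Int) (key : String) (hk : key ≠ "") (grp : List String)
    (hg : ∀ x ∈ grp, PySem.Str.strip x = key) :
    ∀ c : Int, grp.foldl (pvStepA mr) ([], c, some key) =
      (grp.take (mr - 1 - c).toNat, c + grp.length, some key) := by
  induction grp with
  | nil => intro c; simp
  | cons x grp ih =>
    intro c
    have hx : PySem.Str.strip x = key := hg x (List.mem_cons_self)
    have hcond : (some (PySem.Str.strip x) == some key && PySem.Str.strip x != "") = true := by
      simp [hx, hk]
    simp only [List.foldl_cons, pvStepA, hcond, if_true]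
    by_cases h2 : mr ≤ c + 1
    · simp only [if_pos h2]
      rw [ih (fun y hy => hg y (List.mem_cons_of_mem _ hy)) (c + 1)]
      have h0 : (mr - 1 - c).toNat = 0 := by omega
      have h0' : (mr - 1 - (c + 1)).toNat = 0 := by omega
      simp [h0, h0']
      omega
    · simp only [if_neg h2]
      rw [pvStepA_acc, ih (fun y hy => hg y (List.mem_cons_of_mem _ hy)) (c + 1)]
      have hn : (mr - 1 - c).toNat = (mr - 1 - (c + 1)).toNat + 1 := by omega
      simp [hn]
      omega

-- a run of blank lines: every line is appended, state stays (1, some "")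
theorem pvRunA_blank (mr : Int) (grp : List String)
    (hg : ∀ x ∈ grp, PySem.Str.strip x = "") :
    ∀ acc : List String, grp.foldl (pvStepA mr) (acc, 1, some "") = (acc ++ grp, 1, some "") := by
  induction grp with
  | nil => intro acc; simp
  | cons x grp ih =>
    intro acc
    have hx : PySem.Str.strip x = "" := hg x (List.mem_cons_self)
    simp only [List.foldl_cons, pvStepA, hx]
    simp only [bne_self_eq_false, Bool.and_false, Bool.false_eq_true, if_false]
    rw [ih (fun y hy => hg y (List.mem_cons_of_mem _ hy)) (acc ++ [x])]
    simp

-- head of a dropWhile fails the predicate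
theorem pvDropWhile_head (p : String → Bool) (ls t : List String) (x : String)
    (h : ls.dropWhile p = x :: t) : p x = false := by
  induction ls with
  | nil => simp at h
  | cons a l ih =>
    rw [List.dropWhile_cons] at h
    split at h
    · exact ih h
    · rename_i hp; cases h; simpa using hp

-- A's loop from a "fresh" state (the head line does not extend the previous run)
-- computes exactly B's group-then-truncate traversal.
theorem pvMain (mr : Int) : ∀ (n : Nat) (lines : List String) (c : Int) (p : Option String),
    lines.length ≤ n →
    (∀ l t, lines = l :: t → ¬(some (PySem.Str.strip l) = p ∧ PySem.Str.strip l ≠ "")) →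
    (lines.foldl (pvStepA mr) ([], c, p)).1 = pvRunsB (max 1 (mr - 1)) lines := by
  intro n
  induction n with
  | zero =>
    intro lines c p hlen _
    have : lines = [] := List.eq_nil_of_length_eq_zero (Nat.le_zero.mp hlen)
    subst this; simp [pvRunsB]
  | succ n ih =>
    intro lines c p hlen hfresh
    match lines with
    | [] => simp [pvRunsB]
    | l :: ls =>
      set key := PySem.Str.strip l with hkey
      have hstep : pvStepA mr ([], c, p) l = ([l], 1, some key) := by
        have hcond : (some (PySem.Str.strip l) == p && PySem.Str.strip l != "") = false := by
          have := hfresh l ls rfl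
          by_cases hp : some (PySem.Str.strip l) = p
          · have : PySem.Str.strip l = "" := by tauto
            simp [this]
          · simp [hp]
        simp [pvStepA, hcond, hkey]
      set P : String → Bool := fun x => PySem.Str.strip x == key with hP
      have hsplit : ls.takeWhile P ++ ls.dropWhile P = ls := List.takeWhile_append_dropWhile
      have hgrp : ∀ x ∈ ls.takeWhile P, PySem.Str.strip x = key := by
        intro x hx
        have := List.mem_takeWhile_imp hx
        simpa [hP] using this
      have hrestlen : (ls.dropWhile P).length ≤ n := by
        have h1 := List.length_dropWhile_le P ls
        simp only [List.length_cons] at hlen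
        omega
      have hrestfresh : ∀ l' t', ls.dropWhile P = l' :: t' →
          ¬(some (PySem.Str.strip l') = some key ∧ PySem.Str.strip l' ≠ "") := by
        intro l' t' hrest ⟨he, _⟩
        have := pvDropWhile_head P ls t' l' hrest
        simp only [hP] at this
        simp only [Option.some.injEq] at he
        simp [he] at this
      simp only [List.foldl_cons, hstep]
      conv_lhs => rw [← hsplit, List.foldl_append]
      conv_rhs => rw [pvRunsB]
      rw [← hkey, ← hP]
      by_cases hk : key = ""
      · -- blank group: kept whole
        have hgrp' : ∀ x ∈ ls.takeWhile P, PySem.Str.strip x = "" := by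
          intro x hx; rw [hgrp x hx, hk]
        rw [hk]
        rw [pvRunA_blank mr _ hgrp' [l]]
        rw [pvStepA_acc mr (ls.dropWhile P)]
        rw [ih (ls.dropWhile P) 1 (some "") hrestlen (by
          intro l' t' h; have := hrestfresh l' t' h; rw [hk] at this; exact this)]
        simp
      · -- non-blank group: first max(1, mr-1) lines kept
        rw [pvStepA_acc mr (ls.takeWhile P) [l] 1 (some key),
            pvRunA mr key hk _ hgrp 1]
        rw [pvStepA_acc mr (ls.dropWhile P)]
        rw [ih (ls.dropWhile P) (1 + (ls.takeWhile P).length) (some key) hrestlen hrestfresh]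
        rw [if_neg (by simpa using hk)]
        rw [PySem.List.slice_to _ (by omega : (0:Int) ≤ max 1 (mr - 1))]
        have hkn : (max 1 (mr - 1)).toNat = (mr - 1 - 1).toNat + 1 := by omega
        simp [hkn]

-- ===== VERDICT (by name: the statement is the Claim_ definition above) =====
theorem truncate_repetition_py_spec : Claim_equal_truncate_repetition_py := by
  intro text mr _
  unfold Spec_truncate_repetition_py truncate_repetition_py truncate_repetition_py_alt
  simp only
  by_cases h : ((PySem.Str.splitlines text).length : Int) < mr * 2
  · simp [h]
  · simp only [if_neg h]
    congr 1
    exact pvMain mr (PySem.Str.splitlines text).length _ 0 none le_rfl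
      (by intro l t _ ⟨he, _⟩; simp at he)
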